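-- pv_equiv track=rewrite | github.com/scientificbroker/Patentame | fto-freedom-to-operate/scripts/generar_informe_fto.py | generar_resumen_ejecutivo
-- ===== SOURCE A (Python) =====
-- def generar_resumen_ejecutivo(producto: str, patentes: list[dict], jurisdicciones: str) -> str:
--     """Genera el resumen ejecutivo automáticamente."""
--     alto = sum(1 for p in patentes if "Alto" in p["riesgo"])
--     medio = sum(1 for p in patentes if "Medio" in p["riesgo"])
--     bajo = sum(1 for p in patentes if "Bajo" in p["riesgo"])
--     ninguno = sum(1 for p in patentes if "Ninguno" in p["riesgo"])
--     total = len(patentes)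
--
--     resumen = (
--         f"Se analizaron **{total} patente(s)** en relación con el producto: *{producto}*, "
--         f"para las jurisdicciones: **{jurisdicciones}**.\n\n"
--         f"- Patentes de riesgo **alto**: {alto}  \n"
--         f"- Patentes de riesgo **medio**: {medio}  \n"
--         f"- Patentes de riesgo **bajo**: {bajo}  \n"
--         f"- Patentes **sin riesgo**: {ninguno}  \n\n"
--     )
--
--     if alto > 0:
--         resumen += (
--             "Se identificaron patentes con posible infracción literal que requieren "
--             "atención inmediata. Se recomienda evaluar opciones de design around, "
--             "licenciamiento o invalidación antes de la comercialización del producto."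
--         )
--     elif medio > 0:
--         resumen += (
--             "Se identificaron patentes con riesgo medio que requieren análisis adicional "
--             "y monitoreo. Se recomienda consultar con un abogado de PI antes de proceder."
--         )
--     else:
--         resumen += (
--             "No se identificaron patentes con alto riesgo de infracción para el producto "
--             "analizado. Se recomienda documentar este análisis y actualizarlo periódicamente."
--         )
--
--     return resumen
-- ===== SOURCE B (Python) =====
-- NIVELES = ("Alto", "Medio", "Bajo", "Ninguno")
--
-- MSG_ALTO = (
--     "Se identificaron patentes con posible infracción literal que requieren "
--     "atención inmediata. Se recomienda evaluar opciones de design around, "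
--     "licenciamiento o invalidación antes de la comercialización del producto."
-- )
-- MSG_MEDIO = (
--     "Se identificaron patentes con riesgo medio que requieren análisis adicional "
--     "y monitoreo. Se recomienda consultar con un abogado de PI antes de proceder."
-- )
-- MSG_NINGUNO = (
--     "No se identificaron patentes con alto riesgo de infracción para el producto "
--     "analizado. Se recomienda documentar este análisis y actualizarlo periódicamente."
-- )
--
--
-- def generar_resumen_ejecutivo(producto: str, patentes: list[dict], jurisdicciones: str) -> str:
--     """Genera el resumen ejecutivo: clasifica cada patente en etiquetas y cuenta sobre la lista."""
--     # classification pass: one flat list of level tags (a patent may emit several tags)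
--     tags = [kw for p in patentes for kw in NIVELES if kw in p["riesgo"]]
--     alto, medio, bajo, ninguno = (tags.count(kw) for kw in NIVELES)
--     total = len(patentes)
--
--     resumen = (
--         f"Se analizaron **{total} patente(s)** en relación con el producto: *{producto}*, "
--         f"para las jurisdicciones: **{jurisdicciones}**.\n\n"
--         f"- Patentes de riesgo **alto**: {alto}  \n"
--         f"- Patentes de riesgo **medio**: {medio}  \n"
--         f"- Patentes de riesgo **bajo**: {bajo}  \n"
--         f"- Patentes **sin riesgo**: {ninguno}  \n\n"
--     )
--
--     # data-driven choice of the closing recommendation: first level with a hit wins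
--     for cnt, msg in ((alto, MSG_ALTO), (medio, MSG_MEDIO)):
--         if cnt > 0:
--             return resumen + msg
--     return resumen + MSG_NINGUNO
-- ===== Notes on version B (the rewrite author's own statement) =====
-- stated objective: alternative
-- what changed: B replaces the four per-level counting passes with a classification step that flattens patentes into one list of level tags, derives all four counts from tags.count, and selects the closing recommendation by scanning a data-driven (count, message) priority table instead of an if/elif chain.
import Mathlib
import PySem

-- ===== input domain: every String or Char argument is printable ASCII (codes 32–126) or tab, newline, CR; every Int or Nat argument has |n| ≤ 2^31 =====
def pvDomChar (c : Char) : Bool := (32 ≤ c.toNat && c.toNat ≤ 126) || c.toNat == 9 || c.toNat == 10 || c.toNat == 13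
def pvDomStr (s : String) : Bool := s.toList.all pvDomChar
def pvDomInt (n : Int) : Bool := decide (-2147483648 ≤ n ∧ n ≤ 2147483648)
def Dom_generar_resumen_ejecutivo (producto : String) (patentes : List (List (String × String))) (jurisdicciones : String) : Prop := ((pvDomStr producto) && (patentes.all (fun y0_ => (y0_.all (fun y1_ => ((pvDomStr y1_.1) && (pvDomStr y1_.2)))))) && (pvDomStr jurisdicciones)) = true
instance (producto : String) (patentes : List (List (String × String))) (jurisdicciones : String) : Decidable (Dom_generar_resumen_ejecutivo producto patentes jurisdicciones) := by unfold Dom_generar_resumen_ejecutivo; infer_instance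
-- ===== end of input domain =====

-- B classifies each patent into a flat list of level tags, derives the four counts from
-- tags.count, and picks the closing message from a (count, message) priority table.
-- Objective: alternative decomposition (classify-then-count), same cost.

-- p["riesgo"]: first-match lookup (Pre_ guarantees the key is present; on a missing key
-- Python raises KeyError, excluded by Pre_, so the "" default is never claimed about).
def pvRiesgo (p : List (String × String)) : String := (List.lookup "riesgo" p).getD ""

-- ===== PORT A =====
def generar_resumen_ejecutivo (producto : String) (patentes : List (List (String × String))) (jurisdicciones : String) : String :=
  let alto := patentes.foldl (fun acc p => if PySem.Str.isIn "Alto" (pvRiesgo p) then acc + 1 else acc) (0 : Int)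
  let medio := patentes.foldl (fun acc p => if PySem.Str.isIn "Medio" (pvRiesgo p) then acc + 1 else acc) (0 : Int)
  let bajo := patentes.foldl (fun acc p => if PySem.Str.isIn "Bajo" (pvRiesgo p) then acc + 1 else acc) (0 : Int)
  let ninguno := patentes.foldl (fun acc p => if PySem.Str.isIn "Ninguno" (pvRiesgo p) then acc + 1 else acc) (0 : Int)
  let total : Int := patentes.length
  let resumen :=
    "Se analizaron **" ++ PySem.Int.toStr total ++ " patente(s)** en relación con el producto: *" ++ producto ++
    "*, para las jurisdicciones: **" ++ jurisdicciones ++ "**.\n\n" ++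
    "- Patentes de riesgo **alto**: " ++ PySem.Int.toStr alto ++ "  \n" ++
    "- Patentes de riesgo **medio**: " ++ PySem.Int.toStr medio ++ "  \n" ++
    "- Patentes de riesgo **bajo**: " ++ PySem.Int.toStr bajo ++ "  \n" ++
    "- Patentes **sin riesgo**: " ++ PySem.Int.toStr ninguno ++ "  \n\n"
  if alto > 0 then
    resumen ++ "Se identificaron patentes con posible infracción literal que requieren atención inmediata. Se recomienda evaluar opciones de design around, licenciamiento o invalidación antes de la comercialización del producto."
  else if medio > 0 then
    resumen ++ "Se identificaron patentes con riesgo medio que requieren análisis adicional y monitoreo. Se recomienda consultar con un abogado de PI antes de proceder."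
  else
    resumen ++ "No se identificaron patentes con alto riesgo de infracción para el producto analizado. Se recomienda documentar este análisis y actualizarlo periódicamente."

-- ===== PORT B =====
def pvNiveles : List String := ["Alto", "Medio", "Bajo", "Ninguno"]

def pvMsgAlto : String := "Se identificaron patentes con posible infracción literal que requieren atención inmediata. Se recomienda evaluar opciones de design around, licenciamiento o invalidación antes de la comercialización del producto."
def pvMsgMedio : String := "Se identificaron patentes con riesgo medio que requieren análisis adicional y monitoreo. Se recomienda consultar con un abogado de PI antes de proceder."
def pvMsgNinguno : String := "No se identificaron patentes con alto riesgo de infracción para el producto analizado. Se recomienda documentar este análisis y actualizarlo periódicamente."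

-- tags = [kw for p in patentes for kw in NIVELES if kw in p["riesgo"]]
def pvTags (patentes : List (List (String × String))) : List String :=
  patentes.flatMap (fun p => pvNiveles.filter (fun kw => PySem.Str.isIn kw (pvRiesgo p)))

-- the for-loop over the (count, message) priority table with the for-else default
def pvElige (tabla : List (Int × String)) (defecto : String) : String :=
  match tabla with
  | [] => defecto
  | (cnt, msg) :: resto => if cnt > 0 then msg else pvElige resto defecto

def generar_resumen_ejecutivo_alt (producto : String) (patentes : List (List (String × String))) (jurisdicciones : String) : String :=
  let tags := pvTags patentes
  let alto : Int := PySem.List.count tags "Alto"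
  let medio : Int := PySem.List.count tags "Medio"
  let bajo : Int := PySem.List.count tags "Bajo"
  let ninguno : Int := PySem.List.count tags "Ninguno"
  let total : Int := patentes.length
  let resumen :=
    "Se analizaron **" ++ PySem.Int.toStr total ++ " patente(s)** en relación con el producto: *" ++ producto ++
    "*, para las jurisdicciones: **" ++ jurisdicciones ++ "**.\n\n" ++
    "- Patentes de riesgo **alto**: " ++ PySem.Int.toStr alto ++ "  \n" ++
    "- Patentes de riesgo **medio**: " ++ PySem.Int.toStr medio ++ "  \n" ++
    "- Patentes de riesgo **bajo**: " ++ PySem.Int.toStr bajo ++ "  \n" ++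
    "- Patentes **sin riesgo**: " ++ PySem.Int.toStr ninguno ++ "  \n\n"
  resumen ++ pvElige [(alto, pvMsgAlto), (medio, pvMsgMedio)] pvMsgNinguno

-- ===== PRECONDITION & SPEC =====
-- Pre_ excludes only inputs where a patent lacks the "riesgo" key: there Python A (and B) raise KeyError.
def Pre_generar_resumen_ejecutivo (producto : String) (patentes : List (List (String × String))) (jurisdicciones : String) : Prop :=
  ∀ p ∈ patentes, "riesgo" ∈ p.map Prod.fst
instance (producto : String) (patentes : List (List (String × String))) (jurisdicciones : String) : Decidable (Pre_generar_resumen_ejecutivo producto patentes jurisdicciones) := by unfold Pre_generar_resumen_ejecutivo; infer_instance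

def pvWitness_generar_resumen_ejecutivo : String × (List (List (String × String))) × String :=
  ("Widget", [[("riesgo", "Alto")], [("riesgo", "Bajo")]], "US, EP")

def Spec_generar_resumen_ejecutivo (producto : String) (patentes : List (List (String × String))) (jurisdicciones : String) (out : String) : Prop := out = generar_resumen_ejecutivo_alt producto patentes jurisdicciones
instance (producto : String) (patentes : List (List (String × String))) (jurisdicciones : String) (out : String) : Decidable (Spec_generar_resumen_ejecutivo producto patentes jurisdicciones out) := by unfold Spec_generar_resumen_ejecutivo; infer_instance

-- ===== CLAIM (what is proved, stated in full; the proofs are below) =====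
def Claim_equal_generar_resumen_ejecutivo : Prop := ∀ (producto : String) (patentes : List (List (String × String))) (jurisdicciones : String), Dom_generar_resumen_ejecutivo producto patentes jurisdicciones → Pre_generar_resumen_ejecutivo producto patentes jurisdicciones → Spec_generar_resumen_ejecutivo producto patentes jurisdicciones (generar_resumen_ejecutivo producto patentes jurisdicciones)

-- ===== LEMMAS AND PROOFS =====

-- counting a fixed keyword in one patent's tag contribution: 1 if the keyword matches, else 0
theorem pvCount_filter (kw : String) (h1 : kw ∈ pvNiveles) (pred : String → Bool) :
    List.count kw (pvNiveles.filter pred) = if pred kw then 1 else 0 := by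
  split_ifs with h
  · rw [List.count_filter h]
    exact List.count_eq_one_of_mem (by decide) h1
  · exact List.count_eq_zero.mpr (fun hm => h (List.of_mem_filter hm))

-- counting a keyword in B's flattened tag list equals counting matching patents
theorem pvCount_tags (kw : String) (h1 : kw ∈ pvNiveles) (l : List (List (String × String))) :
    List.count kw (pvTags l) =
      l.countP (fun p => PySem.Str.isIn kw (pvRiesgo p)) := by
  induction l with
  | nil => rfl
  | cons p t ih =>
    simp only [pvTags, List.flatMap_cons, List.count_append, List.countP_cons] at *
    rw [ih, pvCount_filter kw h1]
    split_ifs <;> omega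

-- the Int-valued form matching A's counting fold
theorem pvCount_tags_int (kw : String) (h1 : kw ∈ pvNiveles) (l : List (List (String × String))) :
    (PySem.List.count (pvTags l) kw : Int) =
      l.foldl (fun acc p => if PySem.Str.isIn kw (pvRiesgo p) then acc + 1 else acc) (0 : Int) := by
  rw [PySem.List.foldl_if_add_one]
  rw [PySem.List.count_eq, pvCount_tags kw h1]
  simp

-- ===== VERDICT (by name: the statement is the Claim_ definition above) =====
theorem generar_resumen_ejecutivo_spec : Claim_equal_generar_resumen_ejecutivo := by
  intro producto patentes jurisdicciones _ _
  simp only [Spec_generar_resumen_ejecutivo, generar_resumen_ejecutivo, generar_resumen_ejecutivo_alt,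
    pvCount_tags_int "Alto" (by decide), pvCount_tags_int "Medio" (by decide),
    pvCount_tags_int "Bajo" (by decide), pvCount_tags_int "Ninguno" (by decide), pvElige]
  split_ifs <;> rfl
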